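-- pv_equiv track=rewrite | github.com/Baguette-bbang/coding-test | Programmers/level_1/과일_장수.py | solution
-- ===== SOURCE A (Python) =====
-- def solution(k, m, score):
--     answer = 0
--     score = sorted(score, reverse = True)
--     i = m-1
--     while i < len(score):
--         answer += score[i] * m
--         i += m
--     return answer
-- ===== SOURCE B (Python) =====
-- def solution(k, m, score):
--     total = 0
--     s = sorted(score, reverse=True)
--     while s:
--         group, s = s[:m], s[m:]
--         if len(group) == m:
--             total += min(group) * m
--     return total
-- ===== Notes on version B (the rewrite author's own statement) =====
-- stated objective: alternative
-- what changed: Instead of striding an index over every m-th position of the sorted list, B repeatedly splits off the leading group of m elements and adds min(group)*m, consuming the list chunk by chunk.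
import Mathlib
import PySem

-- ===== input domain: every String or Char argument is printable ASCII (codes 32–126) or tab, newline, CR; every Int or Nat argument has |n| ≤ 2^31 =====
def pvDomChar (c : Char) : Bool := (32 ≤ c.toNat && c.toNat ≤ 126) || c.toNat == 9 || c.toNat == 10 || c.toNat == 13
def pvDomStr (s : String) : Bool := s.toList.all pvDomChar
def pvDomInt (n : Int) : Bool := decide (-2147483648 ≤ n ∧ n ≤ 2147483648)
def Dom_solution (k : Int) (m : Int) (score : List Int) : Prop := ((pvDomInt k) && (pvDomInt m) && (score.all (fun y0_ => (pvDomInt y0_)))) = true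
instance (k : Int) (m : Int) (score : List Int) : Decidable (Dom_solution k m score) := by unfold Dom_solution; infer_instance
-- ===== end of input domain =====

-- B consumes the sorted list chunk by chunk (min of each full group) instead of striding an index; alternative decomposition, same cost.

-- ===== PORT A =====
-- fueled transliteration of A's while loop (fuel = len+1 suffices on Pre_: i grows by m ≥ 1 each step)
def aLoop (score : List Int) (m : Int) : Nat → Int → Int → Int
  | 0, _, answer => answer
  | fuel+1, i, answer =>
    if i < (score.length : Int) then
      aLoop score m fuel (i + m) (answer + ((PySem.List.pyGet? score i).getD 0) * m)
    else answer

def solution (k : Int) (m : Int) (score : List Int) : Int :=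
  let s := PySem.List.sorted score (fun x => x) true
  aLoop s m (s.length + 1) (m - 1) 0

-- ===== PORT B =====
-- fueled transliteration of B's while loop (fuel = len suffices on Pre_: the list shrinks by m ≥ 1 each step)
def altLoop (m : Int) : Nat → List Int → Int → Int
  | 0, _, total => total
  | fuel+1, s, total =>
    if s = [] then total
    else
      let group := PySem.List.slice s none (some m)
      let rest := PySem.List.slice s (some m) none
      if (group.length : Int) = m then
        altLoop m fuel rest (total + ((PySem.List.min? group (fun x => x)).getD 0) * m)
      else altLoop m fuel rest total

def solution_alt (k : Int) (m : Int) (score : List Int) : Int :=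
  let s := PySem.List.sorted score (fun x => x) true
  altLoop m s.length s 0

-- ===== PRECONDITION & SPEC =====
-- For m ≤ 0 the Python A never returns (IndexError, or an infinite loop when m = 0 and score ≠ []).
def Pre_solution (k : Int) (m : Int) (score : List Int) : Prop := 1 ≤ m
instance (k : Int) (m : Int) (score : List Int) : Decidable (Pre_solution k m score) := by unfold Pre_solution; infer_instance

def pvWitness_solution : Int × Int × List Int := (4, 2, [4, 1, 3, 2, 5])

def Spec_solution (k : Int) (m : Int) (score : List Int) (out : Int) : Prop := out = solution_alt k m score
instance (k : Int) (m : Int) (score : List Int) (out : Int) : Decidable (Spec_solution k m score out) := by unfold Spec_solution; infer_instance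

-- ===== CLAIM (what is proved, stated in full; the proofs are below) =====
def Claim_equal_solution : Prop := ∀ (k : Int) (m : Int) (score : List Int), Dom_solution k m score → Pre_solution k m score → Spec_solution k m score (solution k m score)

-- ===== LEMMAS AND PROOFS =====

-- common reference: sum over consecutive chunks of size m'+1, each contributing (last of chunk) * (m'+1)
def chunkSum (m' : Nat) : List Int → Int
  | [] => 0
  | x :: t =>
    (if m' ≤ t.length then ((x :: t).take (m' + 1)).getLast?.getD 0 * ((m' : Int) + 1) else 0)
      + chunkSum m' (t.drop m')
termination_by s => s.length
decreasing_by simp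


theorem chunkSum_nil (m' : Nat) : chunkSum m' [] = 0 := by simp [chunkSum]

theorem aLoop_shift (m : Int) (hm : 1 ≤ m) :
    ∀ (f : Nat) (s : List Int) (d : Nat) (i acc : Int),
      (d : Int) ≤ i → d ≤ s.length →
      aLoop s m f i acc = aLoop (s.drop d) m f (i - d) acc := by
  intro f
  induction f with
  | zero => intro s d i acc _ _; rfl
  | succ f ih =>
    intro s d i acc hdi hds
    simp only [aLoop]
    have hlen : ((s.drop d).length : Int) = (s.length : Int) - d := by
      simp [List.length_drop]; omega
    by_cases h : i < (s.length : Int)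
    · rw [if_pos h, if_pos (by omega)]
      have hg : PySem.List.pyGet? s i = PySem.List.pyGet? (s.drop d) (i - d) := by
        rw [PySem.List.pyGet?_of_nonneg s (by omega), PySem.List.pyGet?_of_nonneg (s.drop d) (by omega)]
        rw [List.getElem?_drop]
        congr 1
        omega
      rw [hg]
      rw [ih s d (i + m) _ (by omega) hds]
      congr 1
      omega
    · rw [if_neg h, if_neg (by omega)]

theorem aLoop_chunk (m : Int) (hm : 1 ≤ m) :
    ∀ (n : Nat) (s : List Int), s.length ≤ n →
      ∀ (f : Nat) (acc : Int), s.length ≤ f →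
      aLoop s m f (m - 1) acc = acc + chunkSum (m.toNat - 1) s := by
  intro n
  induction n with
  | zero =>
    intro s hs f acc hf
    have hnil : s = [] := by
      cases s with
      | nil => rfl
      | cons a t => simp at hs
    subst hnil
    cases f with
    | zero => simp [aLoop, chunkSum_nil]
    | succ f => simp [aLoop, chunkSum_nil]; intro h; omega
  | succ n ih =>
    intro s hs f acc hf
    by_cases h : (m - 1 : Int) < (s.length : Int)
    · -- at least one full group
      have hlen : m.toNat ≤ s.length := by omega
      have hpos : 1 ≤ s.length := by omega
      cases f with
      | zero => omega
      | succ f =>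
        simp only [aLoop, if_pos h]
        rw [aLoop_shift m hm f s m.toNat (m - 1 + m) _ (by omega) hlen]
        have harith : m - 1 + m - (m.toNat : Int) = m - 1 := by omega
        rw [harith]
        rw [ih (s.drop m.toNat) (by simp only [List.length_drop]; omega) f _
              (by simp only [List.length_drop]; omega)]
        cases s with
        | nil => simp at hpos
        | cons x t =>
          simp only [List.length_cons] at hlen hpos hs hf h
          have hmt : m.toNat - 1 ≤ t.length := by omega
          rw [chunkSum, if_pos hmt]
          have hdrop : (x :: t).drop m.toNat = t.drop (m.toNat - 1) := by
            conv_lhs => rw [show m.toNat = (m.toNat - 1) + 1 from by omega]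
            exact List.drop_succ_cons
          rw [hdrop]
          rw [show m.toNat - 1 + 1 = m.toNat from by omega]
          rw [show ((m.toNat - 1 : Nat) : Int) + 1 = m from by omega]
          have hterm : (PySem.List.pyGet? (x :: t) (m - 1)).getD 0
              = ((x :: t).take m.toNat).getLast?.getD 0 := by
            rw [PySem.List.pyGet?_of_nonneg (x :: t) (by omega),
                show ((m : Int) - 1).toNat = m.toNat - 1 from by omega]
            have htk : ((x :: t).take m.toNat).getLast? = ((x :: t).take m.toNat)[m.toNat - 1]? := by
              rw [List.getLast?_eq_getElem?]
              congr 1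
              simp only [List.length_take, List.length_cons]
              omega
            rw [htk, List.getElem?_take_of_lt (by omega)]
          rw [hterm]
          ring
    · -- no full group: loop exits immediately and chunkSum is 0
      have hret : aLoop s m f (m - 1) acc = acc := by
        cases f with
        | zero => rfl
        | succ f => simp only [aLoop, if_neg h]
      rw [hret]
      cases s with
      | nil => simp [chunkSum_nil]
      | cons x t =>
        simp only [List.length_cons] at h
        push_cast at h
        rw [chunkSum, if_neg (by omega)]
        have hd : t.drop (m.toNat - 1) = [] := List.drop_eq_nil_of_le (by omega)
        rw [hd, chunkSum_nil]
        ring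

theorem getLast_le_of_desc :
    ∀ (l : List Int), l.Pairwise (fun a b => b ≤ a) → ∀ y ∈ l, l.getLast?.getD 0 ≤ y := by
  intro l
  induction l with
  | nil => intro _ y hy; simp at hy
  | cons x t ih =>
    intro hp y hy
    cases t with
    | nil =>
      simp at hy
      simp [hy]
    | cons a u =>
      rw [List.getLast?_cons_cons]
      rcases List.mem_cons.mp hy with h | h
      · subst h
        have hlast : (a :: u).getLast?.getD 0 ∈ a :: u := by
          rw [List.getLast?_eq_some_getLast (by simp)]
          exact List.getLast_mem _
        exact List.rel_of_pairwise_cons hp hlast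
      · exact ih (List.Pairwise.sublist (List.sublist_cons_self x (a :: u)) hp) y h

theorem min_desc (l : List Int) (hne : l ≠ []) (hp : l.Pairwise (fun a b => b ≤ a)) :
    (PySem.List.min? l (fun x => x)).getD 0 = l.getLast?.getD 0 := by
  obtain ⟨v, hv⟩ : ∃ v, PySem.List.min? l (fun x => x) = some v := by
    cases hmin : PySem.List.min? l (fun x => x) with
    | none => exact absurd ((PySem.List.min?_eq_none_iff l (fun x => x)).mp hmin) hne
    | some v => exact ⟨v, rfl⟩
  rw [hv]
  have hvm : v ∈ l := PySem.List.min?_mem hv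
  have h1 : v ≤ l.getLast?.getD 0 := by
    rw [List.getLast?_eq_some_getLast hne]
    exact PySem.List.min?_isMin hv _ (List.getLast_mem hne)
  have h2 : l.getLast?.getD 0 ≤ v := getLast_le_of_desc l hp v hvm
  simp only [Option.getD_some]
  omega

theorem altLoop_nil (m : Int) (f : Nat) (acc : Int) : altLoop m f [] acc = acc := by
  cases f with
  | zero => rfl
  | succ f => simp [altLoop]

theorem altLoop_chunk (m : Int) (hm : 1 ≤ m) :
    ∀ (n : Nat) (s : List Int), s.length ≤ n → s.Pairwise (fun a b => b ≤ a) →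
      ∀ (f : Nat) (acc : Int), s.length ≤ f →
      altLoop m f s acc = acc + chunkSum (m.toNat - 1) s := by
  intro n
  induction n with
  | zero =>
    intro s hs hp f acc hf
    have hnil : s = [] := by
      cases s with
      | nil => rfl
      | cons a t => simp at hs
    subst hnil
    rw [altLoop_nil, chunkSum_nil]
    ring
  | succ n ih =>
    intro s hs hp f acc hf
    cases s with
    | nil => rw [altLoop_nil, chunkSum_nil]; ring
    | cons x t =>
      simp only [List.length_cons] at hs hf
      cases f with
      | zero => omega
      | succ f =>
        simp only [altLoop, if_neg (by simp : ¬(x :: t = []))]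
        have hgroup : PySem.List.slice (x :: t) none (some m) = (x :: t).take m.toNat :=
          PySem.List.slice_to _ (by omega)
        have hrest : PySem.List.slice (x :: t) (some m) none = (x :: t).drop m.toNat :=
          PySem.List.slice_from _ (by omega)
        rw [hgroup, hrest]
        by_cases hfull : m.toNat ≤ t.length + 1
        · have hcond : ((((x :: t).take m.toNat).length : Nat) : Int) = m := by
            simp only [List.length_take, List.length_cons]
            omega
          rw [if_pos hcond]
          have hne : (x :: t).take m.toNat ≠ [] := by
            intro habs
            have := congrArg List.length habs
            simp only [List.length_take, List.length_cons, List.length_nil] at this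
            omega
          have hptake : ((x :: t).take m.toNat).Pairwise (fun a b => b ≤ a) :=
            List.Pairwise.sublist (List.take_sublist _ _) hp
          rw [min_desc _ hne hptake]
          have hpdrop : ((x :: t).drop m.toNat).Pairwise (fun a b => b ≤ a) :=
            List.Pairwise.sublist (List.drop_sublist _ _) hp
          rw [ih ((x :: t).drop m.toNat) (by simp only [List.length_drop, List.length_cons]; omega)
                hpdrop f _ (by simp only [List.length_drop, List.length_cons]; omega)]
          have hmt : m.toNat - 1 ≤ t.length := by omega
          rw [chunkSum, if_pos hmt]
          have hdrop : (x :: t).drop m.toNat = t.drop (m.toNat - 1) := by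
            conv_lhs => rw [show m.toNat = (m.toNat - 1) + 1 from by omega]
            exact List.drop_succ_cons
          rw [hdrop]
          rw [show m.toNat - 1 + 1 = m.toNat from by omega]
          rw [show ((m.toNat - 1 : Nat) : Int) + 1 = m from by omega]
          ring
        · have hcond : ¬(((((x :: t).take m.toNat).length : Nat) : Int) = m) := by
            simp only [List.length_take, List.length_cons]
            omega
          rw [if_neg hcond]
          have hdnil : (x :: t).drop m.toNat = [] := List.drop_eq_nil_of_le (by simp; omega)
          rw [hdnil, altLoop_nil]
          rw [chunkSum, if_neg (by omega)]
          have hd : t.drop (m.toNat - 1) = [] := List.drop_eq_nil_of_le (by omega)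
          rw [hd, chunkSum_nil]
          ring

theorem solution_spec : Claim_equal_solution := by
  intro k m score _ hpre
  unfold Pre_solution at hpre
  unfold Spec_solution solution solution_alt
  have hp : (PySem.List.sorted score (fun x => x) true).Pairwise (fun a b => b ≤ a) := by
    have := PySem.List.sorted_pairwise_rev score (fun x => x)
    simpa using this
  rw [aLoop_chunk m hpre (PySem.List.sorted score (fun x => x) true).length _ le_rfl _ _ (by omega)]
  rw [altLoop_chunk m hpre (PySem.List.sorted score (fun x => x) true).length _ le_rfl hp _ _ le_rfl]
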